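-- pv_equiv track=rewrite | github.com/NewcastleRSE/XANESNET | xanesnet/datasets/_mp.py | _split_index_ranges
-- ===== SOURCE A (Python) =====
-- def _split_index_ranges(total: int, num_chunks: int) -> list[tuple[int, int]]:
--     """Split ``[0, total)`` into at most ``num_chunks`` ranges.
--
--     Args:
--         total: Number of datasource items.
--         num_chunks: Maximum number of chunks to create.
--
--     Returns:
--         Non-empty ``(start, end)`` ranges for worker assignment.
--     """
--     if total <= 0:
--         return []
--     k = max(1, min(num_chunks, total))
--     base = total // k
--     rem = total % k
--     ranges: list[tuple[int, int]] = []
--     start = 0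
--     for i in range(k):
--         end = start + base + (1 if i < rem else 0)
--         if start < end:
--             ranges.append((start, end))
--         start = end
--     return ranges
-- ===== SOURCE B (Python) =====
-- def _split_index_ranges(total: int, num_chunks: int) -> list[tuple[int, int]]:
--     """Split ``[0, total)`` into at most ``num_chunks`` ranges."""
--     if total <= 0:
--         return []
--     k = max(1, min(num_chunks, total))
--     base = total // k
--     rem = total % k
--     return [(i * base + min(i, rem), (i + 1) * base + min(i + 1, rem))
--             for i in range(k)]
-- ===== Notes on version B (the rewrite author's own statement) =====
-- stated objective: simpler
-- what changed: Replaces the loop that threads a running `start` accumulator (with a non-empty filter) by a closed-form comprehension computing each range directly from its index as (i*base+min(i,rem), (i+1)*base+min(i+1,rem)); since base >= 1 the emptiness filter is provably unnecessary.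
import Mathlib
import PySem

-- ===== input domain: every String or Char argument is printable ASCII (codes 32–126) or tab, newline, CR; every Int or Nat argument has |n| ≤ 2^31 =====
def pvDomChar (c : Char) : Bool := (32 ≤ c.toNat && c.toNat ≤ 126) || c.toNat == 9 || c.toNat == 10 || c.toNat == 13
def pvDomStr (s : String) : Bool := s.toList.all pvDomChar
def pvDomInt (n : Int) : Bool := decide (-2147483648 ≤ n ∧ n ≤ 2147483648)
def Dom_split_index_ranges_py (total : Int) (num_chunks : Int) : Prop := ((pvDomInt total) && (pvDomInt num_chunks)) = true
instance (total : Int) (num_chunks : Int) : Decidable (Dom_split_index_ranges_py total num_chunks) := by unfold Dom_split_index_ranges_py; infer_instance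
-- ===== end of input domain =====

-- B replaces A's loop threading a running `start` accumulator (plus a non-emptiness filter)
-- by a closed-form per-index comprehension; same values, objective: simpler.

-- ===== PORT A =====
def split_index_ranges_py (total : Int) (num_chunks : Int) : List (Int × Int) :=
  if total ≤ 0 then []
  else
    let k := max 1 (min num_chunks total)
    let base := PySem.Int.floordiv total k
    let rem := PySem.Int.mod total k
    let st := (PySem.List.pyRange 0 k 1).foldl
      (fun (s : List (Int × Int) × Int) i =>
        let e := s.2 + base + (if i < rem then 1 else 0)
        (if s.2 < e then s.1 ++ [(s.2, e)] else s.1, e))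
      ([], 0)
    st.1

-- ===== PORT B =====
def split_index_ranges_py_alt (total : Int) (num_chunks : Int) : List (Int × Int) :=
  if total ≤ 0 then []
  else
    let k := max 1 (min num_chunks total)
    let base := PySem.Int.floordiv total k
    let rem := PySem.Int.mod total k
    (PySem.List.pyRange 0 k 1).map
      (fun i => (i * base + min i rem, (i + 1) * base + min (i + 1) rem))

-- ===== PRECONDITION & SPEC =====
def Spec_split_index_ranges_py (total : Int) (num_chunks : Int) (out : List (Int × Int)) : Prop := out = split_index_ranges_py_alt total num_chunks
instance (total : Int) (num_chunks : Int) (out : List (Int × Int)) : Decidable (Spec_split_index_ranges_py total num_chunks out) := by unfold Spec_split_index_ranges_py; infer_instance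

-- ===== CLAIM (what is proved, stated in full; the proofs are below) =====
def Claim_equal_split_index_ranges_py : Prop := ∀ (total : Int) (num_chunks : Int), Dom_split_index_ranges_py total num_chunks → Spec_split_index_ranges_py total num_chunks (split_index_ranges_py total num_chunks)

-- ===== LEMMAS AND PROOFS =====

-- A's loop from index j with start = j*base + min j rem appends exactly the closed-form ranges.
theorem pv_loop_closed_form (base rem : Int) (hb : 1 ≤ base) :
    ∀ (n : Nat) (j : Int) (acc : List (Int × Int)),
      (PySem.List.pyRange j (j + n) 1).foldl
        (fun (s : List (Int × Int) × Int) i =>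
          let e := s.2 + base + (if i < rem then 1 else 0)
          (if s.2 < e then s.1 ++ [(s.2, e)] else s.1, e))
        (acc, j * base + min j rem)
      = (acc ++ (PySem.List.pyRange j (j + n) 1).map
          (fun i => (i * base + min i rem, (i + 1) * base + min (i + 1) rem)),
         (j + n) * base + min (j + n) rem) := by
  intro n
  induction n with
  | zero =>
    intro j acc
    simp [PySem.List.pyRange_one_eq_nil (le_refl j)]
  | succ n ih =>
    intro j acc
    have hlt : j < j + ((n : Int) + 1) := by omega
    have hcast : j + ((n + 1 : Nat) : Int) = (j + 1) + (n : Int) := by push_cast; ring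
    rw [hcast, PySem.List.pyRange_one_cons (by omega)]
    simp only [List.foldl_cons, List.map_cons]
    have hmul : (j + 1) * base = j * base + base := by ring
    have he : j * base + min j rem + base + (if j < rem then (1:Int) else 0)
        = (j + 1) * base + min (j + 1) rem := by
      split_ifs with h <;> omega
    have hlt2 : j * base + min j rem < j * base + min j rem + base + (if j < rem then (1:Int) else 0) := by
      split_ifs with h <;> omega
    rw [if_pos hlt2, he]
    rw [ih (j + 1) (acc ++ [(j * base + min j rem, (j + 1) * base + min (j + 1) rem)])]
    simp

theorem split_index_ranges_py_eq (total num_chunks : Int) :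
    split_index_ranges_py total num_chunks = split_index_ranges_py_alt total num_chunks := by
  unfold split_index_ranges_py split_index_ranges_py_alt
  by_cases ht : total ≤ 0
  · simp [ht]
  · simp only [if_neg ht]
    have htp : 0 < total := by omega
    set k := max 1 (min num_chunks total) with hkdef
    have hk : 0 < k := by omega
    have hkle : k ≤ total := by omega
    have hfd : PySem.Int.floordiv total k = total / k := PySem.Int.floordiv_eq_ediv_of_pos hk
    have hmd : PySem.Int.mod total k = total % k := PySem.Int.mod_eq_emod_of_pos hk
    have hb : 1 ≤ PySem.Int.floordiv total k := by
      rw [hfd, Int.le_ediv_iff_mul_le hk]; omega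
    have hr : 0 ≤ PySem.Int.mod total k := by
      rw [hmd]; exact Int.emod_nonneg total (by omega)
    have H := pv_loop_closed_form (PySem.Int.floordiv total k) (PySem.Int.mod total k) hb
      k.toNat 0 []
    rw [show ((0 : Int) + (k.toNat : Int)) = k by omega,
        show (0 : Int) * PySem.Int.floordiv total k + min 0 (PySem.Int.mod total k) = 0 by omega]
      at H
    rw [H]
    simp

-- ===== VERDICT (by name: the statement is the Claim_ definition above) =====
theorem split_index_ranges_py_spec : Claim_equal_split_index_ranges_py := by
  intro total num_chunks _
  exact split_index_ranges_py_eq total num_chunks
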